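-- pv_equiv track=rewrite | github.com/odobon1/biocosmos | preprocessing/common/phylo.py | get_available_ranks
-- ===== SOURCE A (Python) =====
-- from typing import Dict, List, Optional, Tuple, Set
--
-- RANK_ORDER = ["order", "family", "subfamily", "tribe", "genus"]
--
-- def get_available_ranks(
--     class_data: Dict[str, Dict[str, Optional[str]]],
--     candidate_ranks: Optional[List[str]] = None,
-- ) -> List[str]:
--     """
--     Detect which taxonomic ranks are actually available (non-None) in class_data.
--     Returns ranks in order from broadest to most specific.
--
--     Parameters
--     ----------
--     class_data
--         Dict of class-id -> {rank: value, ...}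
--     candidate_ranks
--         Optional list of ranks to check. If None, uses RANK_ORDER.
--         Should be ordered from broad to specific.
--
--     Returns
--     -------
--     available_ranks
--         Subset of candidate_ranks that have at least one non-None value in class_data.
--         Ordered from broad to specific (genus last).
--     """
--     if candidate_ranks is None:
--         candidate_ranks = RANK_ORDER
--
--     available = []
--     for rank in candidate_ranks:
--         # Check if this rank has any non-None values in the class_data
--         for cid_data in class_data.values():
--             if cid_data.get(rank) is not None:
--                 available.append(rank)
--                 break
--
--     return available
-- ===== SOURCE B (Python) =====
-- RANK_ORDER = ["order", "family", "subfamily", "tribe", "genus"]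
--
-- def get_available_ranks(class_data, candidate_ranks=None):
--     # One pass over class_data building the set of ranks seen with a non-None
--     # value, then a single ordered filter over candidate_ranks.
--     present = set()
--     for cid_data in class_data.values():
--         for rank in cid_data:
--             if cid_data.get(rank) is not None:
--                 present.add(rank)
--     ranks = RANK_ORDER if candidate_ranks is None else candidate_ranks
--     return [rank for rank in ranks if rank in present]
-- ===== Notes on version B (the rewrite author's own statement) =====
-- stated objective: alternative
-- what changed: Inverts the loop nesting: one pass over class_data builds a set of ranks that have a non-None value, then candidate_ranks is filtered by set membership, instead of rescanning class_data per candidate rank with an early break.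
import Mathlib
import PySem

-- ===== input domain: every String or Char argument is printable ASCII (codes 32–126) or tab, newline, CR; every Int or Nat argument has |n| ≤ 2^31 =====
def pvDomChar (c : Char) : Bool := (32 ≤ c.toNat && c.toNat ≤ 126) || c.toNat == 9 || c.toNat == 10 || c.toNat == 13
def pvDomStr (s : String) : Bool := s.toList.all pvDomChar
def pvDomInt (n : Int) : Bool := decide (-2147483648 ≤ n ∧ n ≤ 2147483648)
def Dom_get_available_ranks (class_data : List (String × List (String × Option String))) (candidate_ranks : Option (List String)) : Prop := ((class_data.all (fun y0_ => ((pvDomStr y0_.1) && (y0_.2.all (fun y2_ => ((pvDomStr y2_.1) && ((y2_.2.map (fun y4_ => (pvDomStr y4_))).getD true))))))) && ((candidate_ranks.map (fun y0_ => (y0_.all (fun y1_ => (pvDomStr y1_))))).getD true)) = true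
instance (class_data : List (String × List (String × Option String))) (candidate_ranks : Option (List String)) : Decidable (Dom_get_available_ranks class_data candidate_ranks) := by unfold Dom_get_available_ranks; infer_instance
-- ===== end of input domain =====

-- B inverts the loop nesting: one pass over class_data collects the set of ranks with a
-- non-None value, then candidate_ranks is filtered by membership (objective: alternative
-- decomposition, no early-break rescan of class_data per rank).

-- ===== PORT A =====
def RANK_ORDER : List String := ["order", "family", "subfamily", "tribe", "genus"]

def get_available_ranks (class_data : List (String × List (String × Option String))) (candidate_ranks : Option (List String)) : List String :=
  let ranks := match candidate_ranks with
    | none => RANK_ORDER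
    | some cr => cr
  -- for rank in ranks: for cid_data in class_data.values(): if cid_data.get(rank) is not None: append; break
  ranks.foldl (fun available rank =>
    if class_data.any (fun cid_data => (((PySem.Dict.mk cid_data.2).get? rank).getD none).isSome) then
      available ++ [rank]
    else available) []

-- ===== PORT B =====
def get_available_ranks_alt (class_data : List (String × List (String × Option String))) (candidate_ranks : Option (List String)) : List String :=
  -- present = set(); for cid_data in class_data.values(): for rank in cid_data: if cid_data.get(rank) is not None: present.add(rank)
  let present : PySem.Set String :=
    class_data.foldl (fun s cid_data =>
      cid_data.2.foldl (fun s item =>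
        if (((PySem.Dict.mk cid_data.2).get? item.1).getD none).isSome then PySem.Set.add s item.1
        else s) s)
      PySem.Set.empty
  let ranks := match candidate_ranks with
    | none => RANK_ORDER
    | some cr => cr
  ranks.filter (fun rank => PySem.Set.contains present rank)

-- ===== PRECONDITION & SPEC =====
def Spec_get_available_ranks (class_data : List (String × List (String × Option String))) (candidate_ranks : Option (List String)) (out : List String) : Prop := out = get_available_ranks_alt class_data candidate_ranks
instance (class_data : List (String × List (String × Option String))) (candidate_ranks : Option (List String)) (out : List String) : Decidable (Spec_get_available_ranks class_data candidate_ranks out) := by unfold Spec_get_available_ranks; infer_instance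

-- ===== CLAIM (what is proved, stated in full; the proofs are below) =====
def Claim_equal_get_available_ranks : Prop := ∀ (class_data : List (String × List (String × Option String))) (candidate_ranks : Option (List String)), Dom_get_available_ranks class_data candidate_ranks → Spec_get_available_ranks class_data candidate_ranks (get_available_ranks class_data candidate_ranks)

-- ===== LEMMAS AND PROOFS =====

-- a successful first-match lookup means the key occurs among the pairs
theorem lookup_isSome_imp_key (l : List (String × Option String)) (r : String)
    (h : (((PySem.Dict.mk l).get? r).getD none).isSome = true) :
    ∃ item ∈ l, item.1 = r := by
  induction l with
  | nil => simp [PySem.Dict.get?, List.find?] at h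
  | cons hd tl ih =>
      rw [PySem.Dict.get?_mk_cons] at h
      by_cases hk : hd.1 = r
      · exact ⟨hd, List.mem_cons_self .., hk⟩
      · have hb : (hd.1 == r) = false := by simpa using hk
        rw [hb, if_neg (by simp)] at h
        obtain ⟨it, hit, hr⟩ := ih h
        exact ⟨it, List.mem_cons_of_mem _ hit, hr⟩

-- membership after the inner fold ('for rank in cid_data: if …: present.add(rank)')
theorem mem_inner_fold (p : String × Option String → Bool) (r : String) :
    ∀ (l : List (String × Option String)) (s : PySem.Set String),
    (r ∈ l.foldl (fun s item => if p item then PySem.Set.add s item.1 else s) s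
      ↔ r ∈ s ∨ ∃ item ∈ l, p item ∧ item.1 = r) := by
  intro l
  induction l with
  | nil => simp
  | cons hd tl ih =>
      intro s
      simp only [List.foldl_cons]
      by_cases hp : p hd = true
      · rw [if_pos hp, ih]
        simp only [PySem.Set.mem_add, List.mem_cons]
        constructor
        · rintro (⟨hs | hr⟩ | ⟨it, hit, hp', hr⟩)
          · exact Or.inl hs
          · exact Or.inr ⟨hd, Or.inl rfl, hp, hr.symm⟩
          · exact Or.inr ⟨it, Or.inr hit, hp', hr⟩
        · rintro (hs | ⟨it, (rfl | hit), hp', hr⟩)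
          · exact Or.inl (Or.inl hs)
          · exact Or.inl (Or.inr hr.symm)
          · exact Or.inr ⟨it, hit, hp', hr⟩
      · rw [if_neg hp, ih]
        constructor
        · rintro (hs | ⟨it, hit, hp', hr⟩)
          · exact Or.inl hs
          · exact Or.inr ⟨it, List.mem_cons_of_mem _ hit, hp', hr⟩
        · rintro (hs | ⟨it, hit, hp', hr⟩)
          · exact Or.inl hs
          · rcases List.mem_cons.mp hit with rfl | hit
            · exact absurd hp' hp
            · exact Or.inr ⟨it, hit, hp', hr⟩

-- membership after the whole present-building pass
theorem mem_present (r : String) :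
    ∀ (cd : List (String × List (String × Option String))) (s : PySem.Set String),
    (r ∈ cd.foldl (fun s cid_data =>
        cid_data.2.foldl (fun s item =>
          if (((PySem.Dict.mk cid_data.2).get? item.1).getD none).isSome then PySem.Set.add s item.1
          else s) s) s
      ↔ r ∈ s ∨ ∃ cid ∈ cd, ∃ item ∈ cid.2,
          (((PySem.Dict.mk cid.2).get? item.1).getD none).isSome = true ∧ item.1 = r) := by
  intro cd
  induction cd with
  | nil => simp
  | cons hd tl ih =>
      intro s
      simp only [List.foldl_cons]
      rw [ih, mem_inner_fold]
      simp only [List.mem_cons]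
      constructor
      · rintro (⟨hs | ⟨it, hit, hp, hr⟩⟩ | ⟨cid, hcid, hrest⟩)
        · exact Or.inl hs
        · exact Or.inr ⟨hd, Or.inl rfl, it, hit, hp, hr⟩
        · exact Or.inr ⟨cid, Or.inr hcid, hrest⟩
      · rintro (hs | ⟨cid, (rfl | hcid), hrest⟩)
        · exact Or.inl (Or.inl hs)
        · exact Or.inl (Or.inr hrest)
        · exact Or.inr ⟨cid, hcid, hrest⟩

-- the two per-rank tests coincide
theorem present_contains_eq (cd : List (String × List (String × Option String))) (r : String) :
    PySem.Set.contains
      (cd.foldl (fun s cid_data =>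
        cid_data.2.foldl (fun s item =>
          if (((PySem.Dict.mk cid_data.2).get? item.1).getD none).isSome then PySem.Set.add s item.1
          else s) s) PySem.Set.empty) r
    = cd.any (fun cid_data => (((PySem.Dict.mk cid_data.2).get? r).getD none).isSome) := by
  have hiff : (r ∈ cd.foldl (fun s cid_data =>
        cid_data.2.foldl (fun s item =>
          if (((PySem.Dict.mk cid_data.2).get? item.1).getD none).isSome then PySem.Set.add s item.1
          else s) s) PySem.Set.empty)
      ↔ (cd.any (fun cid_data => (((PySem.Dict.mk cid_data.2).get? r).getD none).isSome) = true) := by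
    rw [mem_present]
    constructor
    · rintro (hs | ⟨cid, hcid, it, hit, hp, rfl⟩)
      · simp [PySem.Set.empty] at hs
      · exact List.any_eq_true.mpr ⟨cid, hcid, hp⟩
    · intro hany
      obtain ⟨cid, hcid, hp⟩ := List.any_eq_true.mp hany
      obtain ⟨it, hit, hr⟩ := lookup_isSome_imp_key cid.2 r hp
      exact Or.inr ⟨cid, hcid, it, hit, by rw [hr]; exact hp, hr⟩
  simp only [PySem.Set.contains, List.contains_eq_mem]
  cases h : cd.any (fun cid_data => (((PySem.Dict.mk cid_data.2).get? r).getD none).isSome) with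
  | false =>
      apply decide_eq_false
      intro hmem
      rw [hiff] at hmem
      exact absurd hmem (by simp [h])
  | true => exact decide_eq_true (hiff.mpr h)

-- ===== VERDICT (by name: the statement is the Claim_ definition above) =====
theorem get_available_ranks_spec : Claim_equal_get_available_ranks := by
  intro class_data candidate_ranks _
  unfold Spec_get_available_ranks get_available_ranks get_available_ranks_alt
  rw [PySem.List.foldl_append_if_eq_filter]
  simp only [List.nil_append]
  apply List.filter_congr
  intro r _
  exact (present_contains_eq class_data r).symm
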